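-- pv_equiv track=rewrite | github.com/Jeong-zju/corl | scripts/env/robocasa_env.py | _choose_video_image_key
-- ===== SOURCE A (Python) =====
-- def _choose_video_image_key(
--     visual_specs: list[tuple[str, str, tuple[int, ...]]],
-- ) -> str | None:
--     env_keys = [env_key for _policy_key, env_key, _shape in visual_specs]
--     for preferred in (
--         "video.robot0_agentview_left",
--         "video.robot0_agentview_right",
--         "video.robot0_eye_in_hand",
--     ):
--         if preferred in env_keys:
--             return preferred
--     return env_keys[0] if env_keys else None
-- ===== SOURCE B (Python) =====
-- def _choose_video_image_key(
--     visual_specs: list[tuple[str, str, tuple[int, ...]]],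
-- ) -> str | None:
--     env_keys = [env_key for _policy_key, env_key, _shape in visual_specs]
--     if not env_keys:
--         return None
--     rank = {
--         "video.robot0_agentview_left": 0,
--         "video.robot0_agentview_right": 1,
--         "video.robot0_eye_in_hand": 2,
--     }
--     return min(env_keys, key=lambda k: rank.get(k, len(rank)))
-- ===== Notes on version B (the rewrite author's own statement) =====
-- stated objective: idiomatic
-- what changed: Replaces the ordered early-return membership scan over three preferred keys with a single table-driven argmin pass: a rank dict maps each preferred key to its priority and min(..., key=rank.get) picks the best-ranked key, relying on min's first-occurrence tie-breaking for the env_keys[0] fallback.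
import Mathlib
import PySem

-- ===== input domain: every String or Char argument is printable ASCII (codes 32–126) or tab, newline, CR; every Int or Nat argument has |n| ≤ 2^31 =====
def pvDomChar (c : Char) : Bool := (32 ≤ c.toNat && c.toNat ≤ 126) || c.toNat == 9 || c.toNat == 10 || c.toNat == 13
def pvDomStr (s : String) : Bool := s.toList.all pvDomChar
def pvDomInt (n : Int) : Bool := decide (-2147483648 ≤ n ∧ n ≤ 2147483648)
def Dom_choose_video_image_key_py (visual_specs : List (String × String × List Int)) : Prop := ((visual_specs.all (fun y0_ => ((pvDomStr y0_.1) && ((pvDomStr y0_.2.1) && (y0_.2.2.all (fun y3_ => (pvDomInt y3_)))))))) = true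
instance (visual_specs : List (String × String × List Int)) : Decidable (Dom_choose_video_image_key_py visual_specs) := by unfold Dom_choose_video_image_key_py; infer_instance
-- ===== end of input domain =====

-- B replaces A's ordered early-return membership scans with one table-driven argmin pass (idiomatic; same O(n) cost).

-- ===== PORT A =====
-- the 'for preferred in (...)' loop: return the first preferred key found in env_keys
def chooseLoopA (prefs : List String) (env_keys : List String) : Option String :=
  match prefs with
  | [] => none
  | p :: rest => if p ∈ env_keys then some p else chooseLoopA rest env_keys

def choose_video_image_key_py (visual_specs : List (String × String × List Int)) : Option String :=
  let env_keys := visual_specs.map (fun t => t.2.1)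
  match chooseLoopA ["video.robot0_agentview_left", "video.robot0_agentview_right",
                     "video.robot0_eye_in_hand"] env_keys with
  | some p => some p
  | none => match env_keys with
            | [] => none
            | k :: _ => some k

-- ===== PORT B =====
def choose_video_image_key_py_alt (visual_specs : List (String × String × List Int)) : Option String :=
  let env_keys := visual_specs.map (fun t => t.2.1)
  if env_keys = [] then none
  else
    let rank : PySem.Dict String Int :=
      PySem.Dict.ofList [("video.robot0_agentview_left", 0),
                         ("video.robot0_agentview_right", 1),
                         ("video.robot0_eye_in_hand", 2)]
    PySem.List.min? env_keys (fun k => rank.getD k (rank.size : Int))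

-- ===== PRECONDITION & SPEC =====
def Spec_choose_video_image_key_py (visual_specs : List (String × String × List Int)) (out : Option String) : Prop := out = choose_video_image_key_py_alt visual_specs
instance (visual_specs : List (String × String × List Int)) (out : Option String) : Decidable (Spec_choose_video_image_key_py visual_specs out) := by unfold Spec_choose_video_image_key_py; infer_instance

-- ===== CLAIM (what is proved, stated in full; the proofs are below) =====
def Claim_equal_choose_video_image_key_py : Prop := ∀ (visual_specs : List (String × String × List Int)), Dom_choose_video_image_key_py visual_specs → Spec_choose_video_image_key_py visual_specs (choose_video_image_key_py visual_specs)

-- ===== LEMMAS AND PROOFS =====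

-- B's ranking function, computed out of the literal dict
def pvRank (k : String) : Int :=
  if k = "video.robot0_agentview_left" then 0
  else if k = "video.robot0_agentview_right" then 1
  else if k = "video.robot0_eye_in_hand" then 2
  else 3

theorem pvRank_eq (k : String) :
    (PySem.Dict.ofList [("video.robot0_agentview_left", (0:Int)),
                        ("video.robot0_agentview_right", 1),
                        ("video.robot0_eye_in_hand", 2)]).getD k
      ((PySem.Dict.ofList [("video.robot0_agentview_left", (0:Int)),
                           ("video.robot0_agentview_right", 1),
                           ("video.robot0_eye_in_hand", 2)]).size : Int) = pvRank k := by
  by_cases h1 : k = "video.robot0_agentview_left"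
  · subst h1; decide
  by_cases h2 : k = "video.robot0_agentview_right"
  · subst h2; decide
  by_cases h3 : k = "video.robot0_eye_in_hand"
  · subst h3; decide
  simp only [show PySem.Dict.ofList [("video.robot0_agentview_left", (0:Int)),
                        ("video.robot0_agentview_right", 1),
                        ("video.robot0_eye_in_hand", 2)] =
        PySem.Dict.mk [("video.robot0_agentview_left", (0:Int)),
                       ("video.robot0_agentview_right", 1),
                       ("video.robot0_eye_in_hand", 2)] from by decide]
  simp [pvRank, PySem.Dict.getD, PySem.Dict.size, PySem.Dict.get?,
        h1, h2, h3, Ne.symm h1, Ne.symm h2, Ne.symm h3]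

-- min? picks the unique element of minimal key
theorem min?_eq_unique {ks : List String} {key : String → Int} {c : String}
    (hc : c ∈ ks) (hmin : ∀ y ∈ ks, key y ≤ key c → y = c) :
    PySem.List.min? ks key = some c := by
  cases h : PySem.List.min? ks key with
  | none =>
      rw [PySem.List.min?_eq_none_iff] at h
      subst h; cases hc
  | some m =>
      have hmem := PySem.List.min?_mem h
      have hle := PySem.List.min?_isMin h c hc
      exact congrArg some (hmin m hmem hle)

-- if no later element strictly beats the head's key, min? returns the head
theorem min?_cons_of_not_lt (key : String → Int) (x0 : String) (t : List String)
    (h : ∀ y ∈ t, ¬ key y < key x0) :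
    PySem.List.min? (x0 :: t) key = some x0 := by
  simp only [PySem.List.min?, List.foldl_cons]
  induction t with
  | nil => rfl
  | cons y t ih =>
      simp only [List.foldl_cons]
      rw [if_neg (h y (List.mem_cons_self))]
      exact ih (fun z hz => h z (List.mem_cons_of_mem _ hz))

-- the core equivalence, on the projected key list
theorem core_eq (ks : List String) :
    (match chooseLoopA ["video.robot0_agentview_left", "video.robot0_agentview_right",
                        "video.robot0_eye_in_hand"] ks with
     | some p => some p
     | none => match ks with
               | [] => none
               | k :: _ => some k) =
    (if ks = [] then none
     else PySem.List.min? ks (fun k => pvRank k)) := by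
  by_cases hL : "video.robot0_agentview_left" ∈ ks
  · have hne : ks ≠ [] := by intro h; subst h; cases hL
    rw [if_neg hne]
    have : PySem.List.min? ks (fun k => pvRank k) = some "video.robot0_agentview_left" := by
      apply min?_eq_unique hL
      intro y _ hy
      by_cases h1 : y = "video.robot0_agentview_left"
      · exact h1
      · exfalso
        have hc : pvRank "video.robot0_agentview_left" = 0 := by decide
        rw [hc] at hy
        simp only [pvRank, h1, if_false] at hy
        split_ifs at hy <;> omega
    rw [this]
    simp [chooseLoopA, hL]
  by_cases hR : "video.robot0_agentview_right" ∈ ks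
  · have hne : ks ≠ [] := by intro h; subst h; cases hR
    rw [if_neg hne]
    have : PySem.List.min? ks (fun k => pvRank k) = some "video.robot0_agentview_right" := by
      apply min?_eq_unique hR
      intro y hyks hy
      by_cases h2 : y = "video.robot0_agentview_right"
      · exact h2
      · exfalso
        have hc : pvRank "video.robot0_agentview_right" = 1 := by decide
        rw [hc] at hy
        by_cases h1 : y = "video.robot0_agentview_left"
        · subst h1; exact hL hyks
        · simp only [pvRank, h1, h2, if_false] at hy
          split_ifs at hy <;> omega
    rw [this]
    simp [chooseLoopA, hL, hR]
  by_cases hE : "video.robot0_eye_in_hand" ∈ ks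
  · have hne : ks ≠ [] := by intro h; subst h; cases hE
    rw [if_neg hne]
    have : PySem.List.min? ks (fun k => pvRank k) = some "video.robot0_eye_in_hand" := by
      apply min?_eq_unique hE
      intro y hyks hy
      by_cases h3 : y = "video.robot0_eye_in_hand"
      · exact h3
      · exfalso
        have hc : pvRank "video.robot0_eye_in_hand" = 2 := by decide
        rw [hc] at hy
        by_cases h1 : y = "video.robot0_agentview_left"
        · subst h1; exact hL hyks
        by_cases h2 : y = "video.robot0_agentview_right"
        · subst h2; exact hR hyks
        simp only [pvRank, h1, h2, h3, if_false] at hy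
        omega
    rw [this]
    simp [chooseLoopA, hL, hR, hE]
  · -- no preferred key present: every key ranks 3, min? returns the head
    have hrank : ∀ y ∈ ks, pvRank y = 3 := by
      intro y hy
      rw [pvRank]
      rw [if_neg (by rintro rfl; exact hL hy), if_neg (by rintro rfl; exact hR hy),
          if_neg (by rintro rfl; exact hE hy)]
    cases ks with
    | nil => simp [chooseLoopA]
    | cons k t =>
        have hloop : chooseLoopA ["video.robot0_agentview_left", "video.robot0_agentview_right",
                                  "video.robot0_eye_in_hand"] (k :: t) = none := by
          simp [chooseLoopA, hL, hR, hE]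
        rw [hloop]
        have : PySem.List.min? (k :: t) (fun x => pvRank x) = some k := by
          apply min?_cons_of_not_lt
          intro y hy
          rw [hrank y (List.mem_cons_of_mem _ hy), hrank k List.mem_cons_self]
          omega
        simp [this]

-- ===== VERDICT (by name: the statement is the Claim_ definition above) =====
theorem choose_video_image_key_py_spec : Claim_equal_choose_video_image_key_py := by
  intro vs _
  unfold Spec_choose_video_image_key_py choose_video_image_key_py choose_video_image_key_py_alt
  simp only []
  have hk : (fun k => (PySem.Dict.ofList [("video.robot0_agentview_left", (0:Int)),
                         ("video.robot0_agentview_right", 1),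
                         ("video.robot0_eye_in_hand", 2)]).getD k
      ((PySem.Dict.ofList [("video.robot0_agentview_left", (0:Int)),
                           ("video.robot0_agentview_right", 1),
                           ("video.robot0_eye_in_hand", 2)]).size : Int)) =
      (fun k => pvRank k) := funext pvRank_eq
  rw [core_eq (vs.map (fun t => t.2.1)), hk]
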